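-- pv_equiv track=rewrite | github.com/Tony-A-Michailidis/gataisha-ai | cato_ai_enhanced.py | _generate_basic_recommendations
-- ===== SOURCE A (Python) =====
-- from typing import Dict, List, Optional
--
-- def _generate_basic_recommendations(
--
--     control_id: str,
--     gaps: List[str]
-- ) -> List[str]:
--     """Fallback basic recommendations"""
--     recommendations = []
--
--     if control_id == 'AC-2' and gaps:
--         if any('Azure AD' in gap for gap in gaps):
--             recommendations.append("Enable Azure AD integration: az aks update --enable-aad")
--         if any('RBAC' in gap for gap in gaps):
--             recommendations.append("Enable RBAC: az aks update --enable-rbac")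
--
--     elif control_id == 'SC-7' and gaps:
--         if any('network policy' in gap.lower() for gap in gaps):
--             recommendations.append("Enable network policy: az aks create --network-policy azure")
--         if any('NetworkPolicies' in gap for gap in gaps):
--             recommendations.append("Define NetworkPolicies for pod-to-pod communication")
--
--     # Generic recommendation
--     if not recommendations:
--         recommendations.append(f"Review {control_id} implementation and address identified gaps")
--
--     return recommendations
-- ===== SOURCE B (Python) =====
-- from typing import Dict, List, Optional
--
-- def _generate_basic_recommendations(
--     control_id: str,
--     gaps: List[str]
-- ) -> List[str]:
--     """Single pass over gaps: accumulate match flags, then emit recommendations."""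
--     if control_id == 'AC-2':
--         first, second = _scan(gaps, lambda g: 'Azure AD' in g, lambda g: 'RBAC' in g)
--         recommendations = (
--             ["Enable Azure AD integration: az aks update --enable-aad"] * first
--             + ["Enable RBAC: az aks update --enable-rbac"] * second
--         )
--     elif control_id == 'SC-7':
--         first, second = _scan(gaps,
--                               lambda g: 'network policy' in g.lower(),
--                               lambda g: 'NetworkPolicies' in g)
--         recommendations = (
--             ["Enable network policy: az aks create --network-policy azure"] * first
--             + ["Define NetworkPolicies for pod-to-pod communication"] * second
--         )
--     else:
--         recommendations = []
--     return recommendations or [f"Review {control_id} implementation and address identified gaps"]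
--
-- def _scan(gaps, p, q):
--     """One traversal of gaps, or-accumulating both predicates; stops once both hit."""
--     hit_p = hit_q = False
--     for gap in gaps:
--         hit_p = hit_p or p(gap)
--         hit_q = hit_q or q(gap)
--         if hit_p and hit_q:
--             break
--     return hit_p, hit_q
-- ===== Notes on version B (the rewrite author's own statement) =====
-- stated objective: alternative
-- what changed: Replaced A's per-needle any()-scans (each needle traverses the whole gaps list) by a single fused pass over gaps that or-accumulates both match flags with early exit once both hit, then emits recommendations from the flags via bool-multiplied list literals.
import Mathlib
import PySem

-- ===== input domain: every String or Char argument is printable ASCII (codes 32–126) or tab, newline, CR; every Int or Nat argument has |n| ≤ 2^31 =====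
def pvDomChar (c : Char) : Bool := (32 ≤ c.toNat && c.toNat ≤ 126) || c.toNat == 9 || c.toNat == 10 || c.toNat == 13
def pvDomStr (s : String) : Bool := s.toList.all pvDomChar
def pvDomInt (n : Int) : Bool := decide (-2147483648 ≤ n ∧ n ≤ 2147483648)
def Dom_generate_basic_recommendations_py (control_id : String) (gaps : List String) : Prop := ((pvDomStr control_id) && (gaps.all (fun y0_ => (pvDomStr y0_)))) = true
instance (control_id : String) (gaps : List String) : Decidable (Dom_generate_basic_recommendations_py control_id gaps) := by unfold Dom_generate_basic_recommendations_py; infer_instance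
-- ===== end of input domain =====

-- B replaces A's two any()-passes per control by one fused pass over gaps accumulating
-- both match flags (with early exit), then emits recommendations from the flags.

-- ===== PORT A =====
def generate_basic_recommendations_py (control_id : String) (gaps : List String) : List String :=
  let recommendations : List String := []
  let recommendations :=
    if control_id == "AC-2" && !gaps.isEmpty then
      let r := if gaps.any (fun gap => PySem.Str.isIn "Azure AD" gap) then
          recommendations ++ ["Enable Azure AD integration: az aks update --enable-aad"] else recommendations
      if gaps.any (fun gap => PySem.Str.isIn "RBAC" gap) then
          r ++ ["Enable RBAC: az aks update --enable-rbac"] else r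
    else if control_id == "SC-7" && !gaps.isEmpty then
      let r := if gaps.any (fun gap => PySem.Str.isIn "network policy" (PySem.Str.lower gap)) then
          recommendations ++ ["Enable network policy: az aks create --network-policy azure"] else recommendations
      if gaps.any (fun gap => PySem.Str.isIn "NetworkPolicies" gap) then
          r ++ ["Define NetworkPolicies for pod-to-pod communication"] else r
    else recommendations
  if recommendations.isEmpty then
    recommendations ++ [PySem.Str.join "" ["Review ", control_id, " implementation and address identified gaps"]]
  else recommendations

-- ===== PORT B =====
-- Source B's _scan loop: one traversal of gaps, or-accumulating both predicates, break once both hit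
def pvScanGo (p q : String → Bool) (hp hq : Bool) : List String → Bool × Bool
  | [] => (hp, hq)
  | gap :: rest =>
    let hp := hp || p gap
    let hq := hq || q gap
    if hp && hq then (hp, hq) else pvScanGo p q hp hq rest

def pvScan (gaps : List String) (p q : String → Bool) : Bool × Bool :=
  pvScanGo p q false false gaps

-- Python ["x"] * b with b a bool: one copy if b else none
def pvRepBool (x : String) (b : Bool) : List String := if b then [x] else []

def generate_basic_recommendations_py_alt (control_id : String) (gaps : List String) : List String :=
  let recommendations :=
    if control_id == "AC-2" then
      let fs := pvScan gaps (fun g => PySem.Str.isIn "Azure AD" g) (fun g => PySem.Str.isIn "RBAC" g)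
      pvRepBool "Enable Azure AD integration: az aks update --enable-aad" fs.1
        ++ pvRepBool "Enable RBAC: az aks update --enable-rbac" fs.2
    else if control_id == "SC-7" then
      let fs := pvScan gaps (fun g => PySem.Str.isIn "network policy" (PySem.Str.lower g)) (fun g => PySem.Str.isIn "NetworkPolicies" g)
      pvRepBool "Enable network policy: az aks create --network-policy azure" fs.1
        ++ pvRepBool "Define NetworkPolicies for pod-to-pod communication" fs.2
    else []
  if recommendations.isEmpty then
    [PySem.Str.join "" ["Review ", control_id, " implementation and address identified gaps"]]
  else recommendations

-- ===== PRECONDITION & SPEC =====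
def Spec_generate_basic_recommendations_py (control_id : String) (gaps : List String) (out : List String) : Prop := out = generate_basic_recommendations_py_alt control_id gaps
instance (control_id : String) (gaps : List String) (out : List String) : Decidable (Spec_generate_basic_recommendations_py control_id gaps out) := by unfold Spec_generate_basic_recommendations_py; infer_instance

-- ===== CLAIM (what is proved, stated in full; the proofs are below) =====
def Claim_equal_generate_basic_recommendations_py : Prop := ∀ (control_id : String) (gaps : List String), Dom_generate_basic_recommendations_py control_id gaps → Spec_generate_basic_recommendations_py control_id gaps (generate_basic_recommendations_py control_id gaps)

-- ===== LEMMAS AND PROOFS =====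
-- the fused single pass computes the same two flags as the two separate any-scans
theorem pvScanGo_eq (p q : String → Bool) (gaps : List String) : ∀ hp hq,
    pvScanGo p q hp hq gaps = (hp || gaps.any p, hq || gaps.any q) := by
  induction gaps with
  | nil => intro hp hq; simp [pvScanGo]
  | cons g rest ih =>
    intro hp hq
    simp only [pvScanGo, List.any_cons]
    by_cases h : ((hp || p g) && (hq || q g)) = true
    · rw [if_pos h]
      obtain ⟨h1, h2⟩ := Bool.and_eq_true_iff.mp h
      simp [h1, h2, ← Bool.or_assoc]
    · rw [if_neg h, ih]
      simp [Bool.or_assoc]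

theorem pvScan_eq (gaps : List String) (p q : String → Bool) :
    pvScan gaps p q = (gaps.any p, gaps.any q) := by
  simp [pvScan, pvScanGo_eq]

-- ===== VERDICT (by name: the statement is the Claim_ definition above) =====
theorem generate_basic_recommendations_py_spec : Claim_equal_generate_basic_recommendations_py := by
  intro control_id gaps _
  unfold Spec_generate_basic_recommendations_py generate_basic_recommendations_py generate_basic_recommendations_py_alt
  by_cases h1 : control_id = "AC-2"
  · subst h1
    simp only [pvScan_eq]
    by_cases he : gaps = []
    · subst he; simp [pvRepBool]
    · cases hc1 : gaps.any (fun gap => PySem.Str.isIn "Azure AD" gap) <;>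
      cases hc2 : gaps.any (fun gap => PySem.Str.isIn "RBAC" gap) <;>
      simp_all [pvRepBool]
  · by_cases h2 : control_id = "SC-7"
    · subst h2
      simp only [pvScan_eq]
      by_cases he : gaps = []
      · subst he; simp [pvRepBool]
      · cases hc1 : gaps.any (fun gap => PySem.Str.isIn "network policy" (PySem.Str.lower gap)) <;>
        cases hc2 : gaps.any (fun gap => PySem.Str.isIn "NetworkPolicies" gap) <;>
        simp_all [pvRepBool]
    · simp [h1, h2]
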